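-- pv_equiv track=rewrite | github.com/Emberfield/autodoc | src/autodoc/cli_old.py | _calculate_complexity_distribution
-- ===== SOURCE A (Python) =====
-- from typing import Any, Dict, List, Optional
--
-- def _calculate_complexity_distribution(files: Dict[str, Any]) -> Dict[str, int]:
--     """Calculate complexity distribution across files"""
--     distribution = {"low": 0, "medium": 0, "high": 0}
--
--     for file_data in files.values():
--         score = file_data["complexity_score"]
--         if score <= 5:
--             distribution["low"] += 1
--         elif score <= 15:
--             distribution["medium"] += 1
--         else:
--             distribution["high"] += 1
--
--     return distribution
-- ===== SOURCE B (Python) =====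
-- def _calculate_complexity_distribution(files):
--     """Calculate complexity distribution across files"""
--     scores = sorted(f["complexity_score"] for f in files.values())
--     n_low = _bisect_right(scores, 5)
--     n_le15 = _bisect_right(scores, 15)
--     return {"low": n_low, "medium": n_le15 - n_low, "high": len(scores) - n_le15}
--
-- def _bisect_right(a, x):
--     # CPython's bisect.bisect_right loop, written out (A imports no bisect module)
--     lo, hi = 0, len(a)
--     while lo < hi:
--         mid = (lo + hi) // 2
--         if x < a[mid]:
--             hi = mid
--         else:
--             lo = mid + 1
--     return lo
-- ===== Notes on version B (the rewrite author's own statement) =====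
-- stated objective: alternative
-- what changed: Replaces A's single bucketing pass over a mutable counter dict by sort + binary search: the scores are sorted once and the three bucket sizes are read off from two bisect_right binary searches at the thresholds 5 and 15.
import Mathlib
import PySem

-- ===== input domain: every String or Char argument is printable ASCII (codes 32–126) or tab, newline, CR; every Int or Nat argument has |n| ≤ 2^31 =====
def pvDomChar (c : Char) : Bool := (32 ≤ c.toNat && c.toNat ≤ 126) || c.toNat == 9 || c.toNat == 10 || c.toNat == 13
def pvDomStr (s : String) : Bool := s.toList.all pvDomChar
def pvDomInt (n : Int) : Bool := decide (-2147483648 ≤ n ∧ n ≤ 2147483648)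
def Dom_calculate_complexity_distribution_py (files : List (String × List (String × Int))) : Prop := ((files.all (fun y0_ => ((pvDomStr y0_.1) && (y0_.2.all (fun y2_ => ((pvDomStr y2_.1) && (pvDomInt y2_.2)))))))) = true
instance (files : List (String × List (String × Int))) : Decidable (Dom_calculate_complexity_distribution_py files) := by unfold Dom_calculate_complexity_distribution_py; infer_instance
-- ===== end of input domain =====

-- B replaces A's single bucketing pass by sort + binary search: sort the scores once,
-- then read the three bucket sizes off two bisect_right searches (alternative decomposition).

-- ===== PORT A =====
def calculate_complexity_distribution_py (files : List (String × List (String × Int))) : List (String × Int) :=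
  let distribution : PySem.Dict String Int :=
    ((PySem.Dict.empty.insert "low" 0).insert "medium" 0).insert "high" 0
  let distribution := (PySem.Dict.ofList files).values.foldl (fun d fd =>
    match (PySem.Dict.ofList fd).get? "complexity_score" with
    | none => d   -- Python raises KeyError here; such inputs are outside Pre_
    | some score =>
      if score ≤ 5 then d.modify "low" 0 (· + 1)
      else if score ≤ 15 then d.modify "medium" 0 (· + 1)
      else d.modify "high" 0 (· + 1)) distribution
  distribution.items

-- ===== PORT B =====
-- f["complexity_score"]; the getD 0 default is never used inside Pre_ (Python raises KeyError there)
def pyScore (fd : List (String × Int)) : Int :=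
  ((PySem.Dict.ofList fd).get? "complexity_score").getD 0

-- Source B's _bisect_right is exactly CPython's bisect_right loop, which PySem.List.bisectRight transcribes.
def calculate_complexity_distribution_py_alt (files : List (String × List (String × Int))) : List (String × Int) :=
  let scores := PySem.List.sorted ((PySem.Dict.ofList files).values.map pyScore) (fun x => x)
  let nLow := PySem.List.bisectRight scores 5
  let nLe15 := PySem.List.bisectRight scores 15
  [("low", (nLow : Int)),
   ("medium", (nLe15 : Int) - (nLow : Int)),
   ("high", (scores.length : Int) - (nLe15 : Int))]

-- ===== PRECONDITION & SPEC =====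
-- Pre_ excludes exactly the inputs where some file record lacks the "complexity_score" key,
-- on which both Pythons raise KeyError.
def Pre_calculate_complexity_distribution_py (files : List (String × List (String × Int))) : Prop :=
  ∀ fd ∈ (PySem.Dict.ofList files).values,
    ((PySem.Dict.ofList fd).get? "complexity_score").isSome = true
instance (files : List (String × List (String × Int))) : Decidable (Pre_calculate_complexity_distribution_py files) := by unfold Pre_calculate_complexity_distribution_py; infer_instance

def pvWitness_calculate_complexity_distribution_py : (List (String × List (String × Int))) :=
  [("a.py", [("complexity_score", 3)]), ("b.py", [("complexity_score", 20)])]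

def Spec_calculate_complexity_distribution_py (files : List (String × List (String × Int))) (out : List (String × Int)) : Prop := out = calculate_complexity_distribution_py_alt files
instance (files : List (String × List (String × Int))) (out : List (String × Int)) : Decidable (Spec_calculate_complexity_distribution_py files out) := by unfold Spec_calculate_complexity_distribution_py; infer_instance

-- ===== CLAIM =====
def Claim_equal_calculate_complexity_distribution_py : Prop := ∀ (files : List (String × List (String × Int))), Dom_calculate_complexity_distribution_py files → Pre_calculate_complexity_distribution_py files → Spec_calculate_complexity_distribution_py files (calculate_complexity_distribution_py files)

-- ===== LEMMAS AND PROOFS =====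

-- A's loop, run from arbitrary counter values, produces the three conditional counts.
lemma cpd_loop (vs : List (List (String × Int))) (a b c : Int)
    (h : ∀ fd ∈ vs, ((PySem.Dict.ofList fd).get? "complexity_score").isSome = true) :
    (vs.foldl (fun d fd =>
        match (PySem.Dict.ofList fd).get? "complexity_score" with
        | none => d
        | some score =>
          if score ≤ 5 then d.modify "low" 0 (· + 1)
          else if score ≤ 15 then d.modify "medium" 0 (· + 1)
          else d.modify "high" 0 (· + 1))
      (PySem.Dict.mk [("low", a), ("medium", b), ("high", c)])).items
    = [("low",    vs.foldl (fun n fd => if pyScore fd ≤ 5 then n + 1 else n) a),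
       ("medium", vs.foldl (fun n fd => if 5 < pyScore fd ∧ pyScore fd ≤ 15 then n + 1 else n) b),
       ("high",   vs.foldl (fun n fd => if 15 < pyScore fd then n + 1 else n) c)] := by
  induction vs generalizing a b c with
  | nil => rfl
  | cons fd rest ih =>
    have hfd := h fd (List.mem_cons_self ..)
    obtain ⟨score, hs⟩ := Option.isSome_iff_exists.mp hfd
    have hps : pyScore fd = score := by simp [pyScore, hs]
    simp only [List.foldl_cons, hs, hps]
    by_cases h5 : score ≤ 5
    · have : ¬ (5 < score ∧ score ≤ 15) := by omega
      have h15 : ¬ 15 < score := by omega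
      simp only [if_pos h5, if_neg this, if_neg h15]
      rw [show (PySem.Dict.mk [("low", a), ("medium", b), ("high", c)]).modify "low" 0 (· + 1)
            = PySem.Dict.mk [("low", a + 1), ("medium", b), ("high", c)] from rfl]
      exact ih _ _ _ (fun x hx => h x (List.mem_cons_of_mem _ hx))
    · by_cases h15 : score ≤ 15
      · have hm : 5 < score ∧ score ≤ 15 := by omega
        have hh : ¬ 15 < score := by omega
        simp only [if_neg h5, if_pos h15, if_pos hm, if_neg hh]
        rw [show (PySem.Dict.mk [("low", a), ("medium", b), ("high", c)]).modify "medium" 0 (· + 1)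
              = PySem.Dict.mk [("low", a), ("medium", b + 1), ("high", c)] from rfl]
        exact ih _ _ _ (fun x hx => h x (List.mem_cons_of_mem _ hx))
      · have hm : ¬ (5 < score ∧ score ≤ 15) := by omega
        have hh : 15 < score := by omega
        simp only [if_neg h5, if_neg h15, if_neg hm, if_pos hh]
        rw [show (PySem.Dict.mk [("low", a), ("medium", b), ("high", c)]).modify "high" 0 (· + 1)
              = PySem.Dict.mk [("low", a), ("medium", b), ("high", c + 1)] from rfl]
        exact ih _ _ _ (fun x hx => h x (List.mem_cons_of_mem _ hx))

-- A conditional-increment fold is a countP.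
lemma foldl_count {α : Type} (p : α → Prop) [DecidablePred p] (l : List α) (a : Int) :
    l.foldl (fun n fd => if p fd then n + 1 else n) a
      = a + (l.countP (fun x => decide (p x)) : Int) := by
  induction l generalizing a with
  | nil => simp
  | cons x t ih =>
    by_cases hx : p x <;> simp [hx, ih] <;> ring

-- If a predicate holds on exactly the first k positions, countP is k.
lemma countP_eq_of_prefix {α : Type} (p : α → Bool) :
    ∀ (s : List α) (k : Nat), k ≤ s.length →
      (∀ i (h : i < s.length), p s[i] = true ↔ i < k) → s.countP p = k := by
  intro s
  induction s with
  | nil => intro k hk _; simp only [List.countP_nil, List.length_nil] at *; omega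
  | cons x t ih =>
    intro k hk hiff
    match k with
    | 0 =>
      have hx : ¬ p x = true := by
        have := hiff 0 (by simp); simpa using this
      have ht : t.countP p = 0 := by
        apply ih 0 (by omega)
        intro i hi
        have := hiff (i+1) (by simpa using Nat.succ_lt_succ hi)
        simpa using this
      simp [hx, ht]
    | k + 1 =>
      have hx : p x = true := by
        have := hiff 0 (by simp); simpa using this
      have ht : t.countP p = k := by
        apply ih k (by simpa using hk)
        intro i hi
        have := hiff (i+1) (by simpa using Nat.succ_lt_succ hi)
        simpa [Nat.succ_lt_succ_iff] using this
      simp [hx, ht]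

-- On a sorted list, bisect_right at x counts the elements ≤ x.
lemma bisectRight_count (s : List Int) (x : Int)
    (hs : s.Pairwise (· ≤ ·)) :
    PySem.List.bisectRight s x = s.countP (fun y => decide (y ≤ x)) := by
  obtain ⟨hle, hlt, hgt⟩ := PySem.List.bisectRight_spec s x hs
  symm
  apply countP_eq_of_prefix _ s _ hle
  intro i hi
  constructor
  · intro hp
    by_contra hk
    have := hgt i hi (by omega)
    simp at hp
    omega
  · intro hk
    have := hlt i hi hk
    simpa using this

-- The three threshold counts partition the list.
lemma count_split (l : List Int) :
    l.countP (fun y => decide (y ≤ 5)) + l.countP (fun y => decide (5 < y) && decide (y ≤ 15))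
      = l.countP (fun y => decide (y ≤ 15))
    ∧ l.countP (fun y => decide (y ≤ 15)) + l.countP (fun y => decide (15 < y)) = l.length := by
  induction l with
  | nil => simp
  | cons a t ih =>
    obtain ⟨ih1, ih2⟩ := ih
    by_cases h5 : a ≤ 5
    · have hg5 : ¬ 5 < a := by omega
      have h15 : a ≤ 15 := by omega
      have hg15 : ¬ 15 < a := by omega
      simp [h5, hg5, h15, hg15]
      omega
    · by_cases h15 : a ≤ 15
      · have hg5 : 5 < a := by omega
        have hg15 : ¬ 15 < a := by omega
        simp [h5, hg5, h15, hg15]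
        omega
      · have hg15 : 15 < a := by omega
        simp [h5, h15, hg15]
        omega

-- ===== VERDICT =====
theorem calculate_complexity_distribution_py_spec : Claim_equal_calculate_complexity_distribution_py := by
  intro files _ hpre
  unfold Spec_calculate_complexity_distribution_py
  unfold calculate_complexity_distribution_py calculate_complexity_distribution_py_alt
  have hinit : ((PySem.Dict.empty.insert "low" (0 : Int)).insert "medium" 0).insert "high" 0
      = PySem.Dict.mk [("low", 0), ("medium", 0), ("high", 0)] := rfl
  simp only [hinit]
  rw [cpd_loop _ 0 0 0 hpre]
  set vs := (PySem.Dict.ofList files).values with hvs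
  set scores := PySem.List.sorted (vs.map pyScore) (fun x => x) with hsc
  have hperm : scores.Perm (vs.map pyScore) := PySem.List.sorted_perm _ _ _
  have hpw : scores.Pairwise (· ≤ ·) := by
    simpa using PySem.List.sorted_pairwise (vs.map pyScore) (fun x => x)
  have hc5 : scores.countP (fun y => decide (y ≤ 5))
      = vs.countP (fun fd => decide (pyScore fd ≤ 5)) := by
    rw [hperm.countP_eq, List.countP_map]; rfl
  have hc15 : scores.countP (fun y => decide (y ≤ 15))
      = vs.countP (fun fd => decide (pyScore fd ≤ 15)) := by
    rw [hperm.countP_eq, List.countP_map]; rfl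
  have hlen : scores.length = vs.length := by
    simpa using hperm.length_eq
  obtain ⟨hsplit1, hsplit2⟩ := count_split scores
  have hm : scores.countP (fun y => decide (5 < y) && decide (y ≤ 15))
      = vs.countP (fun fd => decide (5 < pyScore fd) && decide (pyScore fd ≤ 15)) := by
    rw [hperm.countP_eq, List.countP_map]; rfl
  have hh : scores.countP (fun y => decide (15 < y))
      = vs.countP (fun fd => decide (15 < pyScore fd)) := by
    rw [hperm.countP_eq, List.countP_map]; rfl
  rw [foldl_count (fun fd => pyScore fd ≤ 5),
      foldl_count (fun fd => 5 < pyScore fd ∧ pyScore fd ≤ 15),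
      foldl_count (fun fd => 15 < pyScore fd),
      bisectRight_count scores 5 hpw, bisectRight_count scores 15 hpw]
  have hfun : (fun x => decide (5 < pyScore x ∧ pyScore x ≤ 15))
      = (fun x => decide (5 < pyScore x) && decide (pyScore x ≤ 15)) := by
    funext x
    by_cases h : 5 < pyScore x <;> by_cases h2 : pyScore x ≤ 15 <;> simp [h, h2]
  rw [hfun]
  simp only [List.cons.injEq, Prod.mk.injEq, true_and, and_true]
  refine ⟨?_, ?_, ?_⟩ <;> omega
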